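-- pv_equiv track=rewrite | github.com/BHartDontStop88/AgentHart | dashboard.py | _build_phase_states
-- ===== SOURCE A (Python) =====
-- def _build_phase_states(phase_defs, saved_phases):
--     saved = {p["phase_key"]: p for p in saved_phases}
--     result = []
--     unlocked = True
--     for i, pdef in enumerate(phase_defs):
--         key = pdef["key"]
--         if key in saved and saved[key]["status"] == "complete":
--             result.append({**pdef, "state": "complete",
--                            "user_content": saved[key]["user_content"],
--                            "ai_suggestion": saved[key].get("ai_suggestion")})
--         elif unlocked:
--             result.append({**pdef, "state": "active", "user_content": "", "ai_suggestion": None})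
--             unlocked = False
--         else:
--             result.append({**pdef, "state": "locked", "user_content": "", "ai_suggestion": None})
--     return result
-- ===== SOURCE B (Python) =====
-- def _build_phase_states(phase_defs, saved_phases):
--     saved = {p["phase_key"]: p for p in saved_phases}
--     # keep only the completed phase records: the rest of the work is a bare membership test
--     done = {k: v for k, v in saved.items() if v.get("status") == "complete"}
--
--     def completed(d):
--         sp = done[d["key"]]
--         return {**d, "state": "complete", "user_content": sp["user_content"],
--                 "ai_suggestion": sp.get("ai_suggestion")}
--
--     def pending(d, state):
--         return {**d, "state": state, "user_content": "", "ai_suggestion": None}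
--
--     # recursion peels the completed prefix; at the first pending phase ('active')
--     # the remainder is a stateless map (completed or locked)
--     def go(defs):
--         if not defs:
--             return []
--         head, tail = defs[0], defs[1:]
--         if head["key"] in done:
--             return [completed(head)] + go(tail)
--         return [pending(head, "active")] + [
--             completed(d) if d["key"] in done else pending(d, "locked")
--             for d in tail
--         ]
--
--     return go(phase_defs)
-- ===== Notes on version B (the rewrite author's own statement) =====
-- stated objective: alternative
-- what changed: B pre-filters the saved records into a dict 'done' containing only completed phases (so completeness becomes a bare membership test), and replaces A's loop with its carried 'unlocked' flag by recursion that peels the completed prefix and, at the first pending phase, finishes the tail with a stateless map.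
import Mathlib
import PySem

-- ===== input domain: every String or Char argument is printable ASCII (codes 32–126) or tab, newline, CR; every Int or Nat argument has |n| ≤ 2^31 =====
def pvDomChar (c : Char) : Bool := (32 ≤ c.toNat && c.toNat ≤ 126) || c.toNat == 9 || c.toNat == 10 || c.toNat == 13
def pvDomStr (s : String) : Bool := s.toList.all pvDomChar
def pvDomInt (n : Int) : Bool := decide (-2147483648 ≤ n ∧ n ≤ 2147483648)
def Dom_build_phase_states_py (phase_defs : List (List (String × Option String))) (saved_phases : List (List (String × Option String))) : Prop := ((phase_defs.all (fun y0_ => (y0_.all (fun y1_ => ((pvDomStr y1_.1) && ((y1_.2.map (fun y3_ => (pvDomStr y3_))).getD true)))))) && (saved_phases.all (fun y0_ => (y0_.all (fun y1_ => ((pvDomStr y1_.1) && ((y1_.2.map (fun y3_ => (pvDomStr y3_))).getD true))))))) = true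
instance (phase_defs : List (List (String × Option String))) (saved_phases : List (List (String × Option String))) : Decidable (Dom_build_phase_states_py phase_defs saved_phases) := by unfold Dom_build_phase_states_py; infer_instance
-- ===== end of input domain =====

-- B pre-filters the saved records into a dict 'done' of completed phases only (the loop condition
-- becomes a bare membership test) and replaces A's flag-carrying loop by recursion that peels the
-- completed prefix and finishes the tail with a stateless map (alternative decomposition, same O(n)).

-- shared helper: saved = {p["phase_key"]: p for p in saved_phases}  (identical line in A and Source B)
def pvSavedDict (saved_phases : List (List (String × Option String))) :
    PySem.Dict (Option String) (PySem.Dict String (Option String)) :=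
  saved_phases.foldl
    (fun d p =>
      let pd := PySem.Dict.mk p
      d.insert ((pd.get? "phase_key").getD none) pd)
    PySem.Dict.empty

-- shared helper: {**d, "state": st, "user_content": uc, "ai_suggestion": ai}  (identical dict-display in A and Source B)
def pvEntry (d : List (String × Option String)) (st uc ai : Option String) :
    List (String × Option String) :=
  ((((PySem.Dict.mk d).insert "state" st).insert "user_content" uc).insert "ai_suggestion" ai).items

-- shared helper: pdef["key"] (Pre_ guarantees the field is present in Python)
def pvKeyOf (d : List (String × Option String)) : Option String :=
  ((PySem.Dict.mk d).get? "key").getD none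

-- ===== PORT A =====
-- loop body of A (executed once per pdef, carrying (result, unlocked))
def pvStepA (saved : PySem.Dict (Option String) (PySem.Dict String (Option String)))
    (st : List (List (String × Option String)) × Bool) (pdef : List (String × Option String)) :
    List (List (String × Option String)) × Bool :=
  if saved.contains (pvKeyOf pdef) &&
     ((saved.getD (pvKeyOf pdef) PySem.Dict.empty).getD "status" none == some "complete") then
    -- saved[key]["user_content"] / saved[key].get("ai_suggestion"); Pre_ guarantees they exist when taken
    (st.1 ++ [pvEntry pdef (some "complete")
                ((saved.getD (pvKeyOf pdef) PySem.Dict.empty).getD "user_content" none)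
                ((saved.getD (pvKeyOf pdef) PySem.Dict.empty).getD "ai_suggestion" none)], st.2)
  else if st.2 then
    (st.1 ++ [pvEntry pdef (some "active") (some "") none], false)
  else
    (st.1 ++ [pvEntry pdef (some "locked") (some "") none], st.2)

def build_phase_states_py (phase_defs : List (List (String × Option String))) (saved_phases : List (List (String × Option String))) : List (List (String × Option String)) :=
  (phase_defs.foldl (pvStepA (pvSavedDict saved_phases)) ([], true)).1

-- ===== PORT B =====
-- done = {k: v for k, v in saved.items() if v.get("status") == "complete"}
def pvDoneDict (saved_phases : List (List (String × Option String))) :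
    PySem.Dict (Option String) (PySem.Dict String (Option String)) :=
  (pvSavedDict saved_phases).items.foldl
    (fun d kv => if kv.2.getD "status" none == some "complete" then d.insert kv.1 kv.2 else d)
    PySem.Dict.empty

-- completed(d): the complete entry, its record looked up in done
def pvCompletedB (done : PySem.Dict (Option String) (PySem.Dict String (Option String)))
    (d : List (String × Option String)) : List (String × Option String) :=
  let sp := done.getD (pvKeyOf d) PySem.Dict.empty
  pvEntry d (some "complete") (sp.getD "user_content" none) (sp.getD "ai_suggestion" none)

-- go(defs): peel the completed prefix recursively; at the first pending phase ('active')
-- the remainder is a stateless map (completed or locked)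
def pvGoB (done : PySem.Dict (Option String) (PySem.Dict String (Option String))) :
    List (List (String × Option String)) → List (List (String × Option String))
  | [] => []
  | d :: t =>
    if done.contains (pvKeyOf d) then
      pvCompletedB done d :: pvGoB done t
    else
      pvEntry d (some "active") (some "") none ::
        t.map (fun d' =>
          if done.contains (pvKeyOf d') then pvCompletedB done d'
          else pvEntry d' (some "locked") (some "") none)

def build_phase_states_py_alt (phase_defs : List (List (String × Option String))) (saved_phases : List (List (String × Option String))) : List (List (String × Option String)) :=
  pvGoB (pvDoneDict saved_phases) phase_defs

-- ===== PRECONDITION & SPEC =====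
-- Pre_ = exactly the inputs on which the Python A returns (no KeyError): every saved phase carries
-- the "phase_key" field, every phase def the "key" field, and a saved phase matched by some def
-- carries "status" (and "user_content" when its status is "complete").

-- the saved dict keyed by each phase's phase_key, as Pre_ needs it
def pvPreSaved (saved_phases : List (List (String × Option String))) :
    PySem.Dict (Option String) (PySem.Dict String (Option String)) :=
  saved_phases.foldl
    (fun d p => d.insert (((PySem.Dict.mk p).get? "phase_key").getD none) (PySem.Dict.mk p))
    PySem.Dict.empty

def Pre_build_phase_states_py (phase_defs : List (List (String × Option String))) (saved_phases : List (List (String × Option String))) : Prop :=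
  (saved_phases.all (fun p => (PySem.Dict.mk p).contains "phase_key") &&
   phase_defs.all (fun pdef =>
     (PySem.Dict.mk pdef).contains "key" &&
     (match (pvPreSaved saved_phases).get? (((PySem.Dict.mk pdef).get? "key").getD none) with
      | none => true
      | some sp => sp.contains "status" &&
          (!(sp.getD "status" none == some "complete") || sp.contains "user_content")))) = true
instance (phase_defs : List (List (String × Option String))) (saved_phases : List (List (String × Option String))) : Decidable (Pre_build_phase_states_py phase_defs saved_phases) := by unfold Pre_build_phase_states_py; infer_instance

def pvWitness_build_phase_states_py : (List (List (String × Option String))) × (List (List (String × Option String))) :=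
  ([[("key", some "a"), ("title", some "Phase 1")], [("key", some "b")], [("key", some "c")]],
   [[("phase_key", some "a"), ("status", some "complete"), ("user_content", some "done"), ("ai_suggestion", some "tip")]])

def Spec_build_phase_states_py (phase_defs : List (List (String × Option String))) (saved_phases : List (List (String × Option String))) (out : List (List (String × Option String))) : Prop := out = build_phase_states_py_alt phase_defs saved_phases
instance (phase_defs : List (List (String × Option String))) (saved_phases : List (List (String × Option String))) (out : List (List (String × Option String))) : Decidable (Spec_build_phase_states_py phase_defs saved_phases out) := by unfold Spec_build_phase_states_py; infer_instance

-- ===== CLAIM (what is proved, stated in full; the proofs are below) =====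
def Claim_equal_build_phase_states_py : Prop := ∀ (phase_defs : List (List (String × Option String))) (saved_phases : List (List (String × Option String))), Dom_build_phase_states_py phase_defs saved_phases → Pre_build_phase_states_py phase_defs saved_phases → Spec_build_phase_states_py phase_defs saved_phases (build_phase_states_py phase_defs saved_phases)

-- ===== LEMMAS AND PROOFS =====

-- A's inline completeness condition and complete-entry expression (shorthands for the proofs)
def pvCondA (saved : PySem.Dict (Option String) (PySem.Dict String (Option String)))
    (d : List (String × Option String)) : Bool :=
  saved.contains (pvKeyOf d) &&
    ((saved.getD (pvKeyOf d) PySem.Dict.empty).getD "status" none == some "complete")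

def pvCompEntA (saved : PySem.Dict (Option String) (PySem.Dict String (Option String)))
    (d : List (String × Option String)) : List (String × Option String) :=
  pvEntry d (some "complete") ((saved.getD (pvKeyOf d) PySem.Dict.empty).getD "user_content" none)
    ((saved.getD (pvKeyOf d) PySem.Dict.empty).getD "ai_suggestion" none)

-- recursive form of A's loop (proof device)
def pvLoopA (saved : PySem.Dict (Option String) (PySem.Dict String (Option String))) :
    List (List (String × Option String)) → Bool → List (List (String × Option String))
  | [], _ => []
  | d :: t, u =>
    if pvCondA saved d then pvCompEntA saved d :: pvLoopA saved t u
    else if u then pvEntry d (some "active") (some "") none :: pvLoopA saved t false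
    else pvEntry d (some "locked") (some "") none :: pvLoopA saved t u

lemma pvStepA_eq (saved : PySem.Dict (Option String) (PySem.Dict String (Option String)))
    (st : List (List (String × Option String)) × Bool) (d : List (String × Option String)) :
    pvStepA saved st d =
      if pvCondA saved d then (st.1 ++ [pvCompEntA saved d], st.2)
      else if st.2 then (st.1 ++ [pvEntry d (some "active") (some "") none], false)
      else (st.1 ++ [pvEntry d (some "locked") (some "") none], st.2) := rfl

lemma pvFoldl_eq_loopA (saved : PySem.Dict (Option String) (PySem.Dict String (Option String)))
    (l : List (List (String × Option String))) :
    ∀ (acc : List (List (String × Option String))) (u : Bool),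
    (l.foldl (pvStepA saved) (acc, u)).1 = acc ++ pvLoopA saved l u := by
  induction l with
  | nil => intro acc u; simp [pvLoopA]
  | cons d t ih =>
    intro acc u
    rw [List.foldl_cons, pvStepA_eq]
    by_cases hc : pvCondA saved d = true
    · rw [if_pos hc]; simp [pvLoopA, hc, ih]
    · rw [if_neg hc]
      simp only [Bool.not_eq_true] at hc
      cases u <;> simp [pvLoopA, hc, ih]

-- a dict with Nodup keys is looked up by the first matching item
lemma pvGet?_eq_find {κ ν : Type} [BEq κ] [LawfulBEq κ]
    (d : PySem.Dict κ ν) (hnd : d.keys.Nodup) (k : κ) :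
    d.get? k = (d.items.find? (fun kv => k == kv.1)).map (·.2) := by
  cases h : d.items.find? (fun kv => k == kv.1) with
  | none =>
    simp only [Option.map_none]
    rw [List.find?_eq_none] at h
    rw [PySem.Dict.get?_eq_none_iff_not_mem_keys]
    simp only [PySem.Dict.keys, List.mem_map]
    rintro ⟨kv, hm, hk⟩
    exact absurd (by simp [hk]) (h kv hm)
  | some kv =>
    have hmem := List.mem_of_find?_eq_some h
    have hk : k = kv.1 := by simpa using List.find?_some h
    simpa using PySem.Dict.get?_of_mem_items d (k := k) (v := kv.2)
      (by rw [hk]; simpa using hmem) hnd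

-- the filtering fold over an association list with fresh Nodup keys, looked up
lemma pvFiltFold_get? {κ ν : Type} [BEq κ] [LawfulBEq κ] (P : ν → Bool)
    (l : List (κ × ν)) (k : κ) :
    ∀ (acc : PySem.Dict κ ν), (∀ kv ∈ l, acc.contains kv.1 = false) → (l.map (·.1)).Nodup →
    (l.foldl (fun d kv => if P kv.2 then d.insert kv.1 kv.2 else d) acc).get? k =
      (match l.find? (fun kv => k == kv.1) with
       | some kv => if P kv.2 then some kv.2 else none
       | none => acc.get? k) := by
  induction l with
  | nil => intro acc _ _; simp
  | cons kv0 t ih =>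
    intro acc hdisj hnd
    have hnd' : (t.map (·.1)).Nodup := by simpa using hnd.of_cons
    have hcons : kv0.1 ∉ t.map (·.1) ∧ (t.map (·.1)).Nodup := by
      simpa [List.nodup_cons] using hnd
    have hk0t : ∀ kv ∈ t, (kv0.1 == kv.1) = false := by
      intro kv hm
      exact beq_eq_false_iff_ne.mpr fun h =>
        hcons.1 (by rw [h]; exact List.mem_map_of_mem hm)
    by_cases hP : P kv0.2 = true
    · have hdisj' : ∀ kv ∈ t, (acc.insert kv0.1 kv0.2).contains kv.1 = false := by
        intro kv hm
        rw [PySem.Dict.contains_insert]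
        simp only [Bool.or_eq_false_iff]
        refine ⟨?_, hdisj kv (by simp [hm])⟩
        exact beq_eq_false_iff_ne.mpr fun h =>
          absurd (hk0t kv hm) (by simp [h])
      rw [List.foldl_cons, if_pos hP, ih _ hdisj' hnd']
      by_cases hk : k = kv0.1
      · have hfind : t.find? (fun kv => k == kv.1) = none := by
          rw [List.find?_eq_none]; intro kv hm; simp [hk, hk0t kv hm]
        rw [hfind, List.find?_cons_of_pos (by simp [hk])]
        rw [hk]
        simp [hP, PySem.Dict.get?_insert_self]
      · rw [List.find?_cons_of_neg (by simpa using hk)]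
        cases hf : t.find? (fun kv => k == kv.1) <;>
          simp [PySem.Dict.get?_insert_of_ne _ _ hk]
    · have hPf : P kv0.2 = false := by simpa using hP
      rw [List.foldl_cons, if_neg hP, ih _ (fun kv hm => hdisj kv (by simp [hm])) hnd']
      by_cases hk : k = kv0.1
      · have hfind : t.find? (fun kv => k == kv.1) = none := by
          rw [List.find?_eq_none]; intro kv hm; simp [hk, hk0t kv hm]
        rw [hfind, List.find?_cons_of_pos (by simp [hk])]
        have hck : acc.contains k = false := by rw [hk]; exact hdisj kv0 (by simp)
        rw [PySem.Dict.contains_eq_isSome_get?] at hck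
        have hnone : acc.get? k = none := by
          cases hgk : acc.get? k with
          | none => rfl
          | some v => rw [hgk] at hck; simp at hck
        simp [hPf, hnone]
      · rw [List.find?_cons_of_neg (by simpa using hk)]

-- saved's keys are Nodup (it is a single insert loop from empty)
lemma pvSaved_nodup (saved_phases : List (List (String × Option String))) :
    (pvSavedDict saved_phases).keys.Nodup := by
  unfold pvSavedDict
  exact PySem.Dict.nodup_keys_foldl_insert_key _ _ _ _ PySem.Dict.nodup_keys_empty

-- the filtered dict looked up: done.get? k keeps saved.get? k exactly when its status is complete
lemma pvDone_get? (saved_phases : List (List (String × Option String))) (k : Option String) :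
    (pvDoneDict saved_phases).get? k =
      (match (pvSavedDict saved_phases).get? k with
       | some sp => if sp.getD "status" none == some "complete" then some sp else none
       | none => none) := by
  have hnd := pvSaved_nodup saved_phases
  have h1 := pvFiltFold_get? (fun v => v.getD "status" none == some "complete")
      (pvSavedDict saved_phases).items k PySem.Dict.empty
      (fun kv _ => PySem.Dict.contains_empty _) hnd
  rw [pvDoneDict, h1, pvGet?_eq_find _ hnd k]
  cases hf : (pvSavedDict saved_phases).items.find? (fun kv => k == kv.1) <;> simp

-- A's condition is B's membership test in done
lemma pvCond_eq_done (saved_phases : List (List (String × Option String)))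
    (d : List (String × Option String)) :
    pvCondA (pvSavedDict saved_phases) d = (pvDoneDict saved_phases).contains (pvKeyOf d) := by
  rw [pvCondA, PySem.Dict.contains_eq_isSome_get?, PySem.Dict.contains_eq_isSome_get?,
      pvDone_get?,
      PySem.Dict.getD_eq_get?_getD (pvSavedDict saved_phases) (pvKeyOf d) PySem.Dict.empty]
  cases h : (pvSavedDict saved_phases).get? (pvKeyOf d) with
  | none => simp
  | some sp => by_cases hs : (sp.getD "status" none == some "complete") = true <;> simp [hs]

-- on a completed phase both ports read the same saved record
lemma pvCompEnt_eq (saved_phases : List (List (String × Option String)))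
    (d : List (String × Option String))
    (hc : pvCondA (pvSavedDict saved_phases) d = true) :
    pvCompEntA (pvSavedDict saved_phases) d = pvCompletedB (pvDoneDict saved_phases) d := by
  have hget : (pvDoneDict saved_phases).get? (pvKeyOf d) =
      (pvSavedDict saved_phases).get? (pvKeyOf d) := by
    rw [pvCondA, Bool.and_eq_true, PySem.Dict.contains_eq_isSome_get?,
        PySem.Dict.getD_eq_get?_getD (pvSavedDict saved_phases) (pvKeyOf d) PySem.Dict.empty] at hc
    obtain ⟨h1, h2⟩ := hc
    cases h : (pvSavedDict saved_phases).get? (pvKeyOf d) with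
    | none => rw [h] at h1; simp at h1
    | some sp => rw [h] at h2; rw [pvDone_get?, h]; simpa using h2
  have heq : (pvSavedDict saved_phases).getD (pvKeyOf d) PySem.Dict.empty
      = (pvDoneDict saved_phases).getD (pvKeyOf d) PySem.Dict.empty := by
    rw [PySem.Dict.getD_eq_get?_getD, PySem.Dict.getD_eq_get?_getD, hget]
  unfold pvCompEntA pvCompletedB
  rw [heq]

-- with unlocked = false, A's loop is B's stateless tail map
lemma pvLoopA_false_eq_map (saved_phases : List (List (String × Option String)))
    (t : List (List (String × Option String))) :
    pvLoopA (pvSavedDict saved_phases) t false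
      = t.map (fun d' =>
          if (pvDoneDict saved_phases).contains (pvKeyOf d') then pvCompletedB (pvDoneDict saved_phases) d'
          else pvEntry d' (some "locked") (some "") none) := by
  induction t with
  | nil => simp [pvLoopA]
  | cons d' t' ih =>
    simp only [pvLoopA, List.map_cons, ← pvCond_eq_done, ih]
    by_cases hc : pvCondA (pvSavedDict saved_phases) d' = true
    · simp [hc, pvCompEnt_eq _ _ hc]
    · simp [hc]

-- with unlocked = true, A's loop IS B's recursion
lemma pvLoopA_eq_goB (saved_phases : List (List (String × Option String)))
    (l : List (List (String × Option String))) :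
    pvLoopA (pvSavedDict saved_phases) l true = pvGoB (pvDoneDict saved_phases) l := by
  induction l with
  | nil => simp [pvLoopA, pvGoB]
  | cons d t ih =>
    simp only [pvLoopA, pvGoB, ← pvCond_eq_done]
    by_cases hc : pvCondA (pvSavedDict saved_phases) d = true
    · simp only [if_pos hc, ih, pvCompEnt_eq _ _ hc]
    · simp [hc, pvLoopA_false_eq_map, ← pvCond_eq_done]

-- ===== VERDICT (by name: the statement is the Claim_ definition above) =====
theorem build_phase_states_py_spec : Claim_equal_build_phase_states_py := by
  intro phase_defs saved_phases _ _
  unfold Spec_build_phase_states_py build_phase_states_py build_phase_states_py_alt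
  rw [pvFoldl_eq_loopA, List.nil_append, pvLoopA_eq_goB]
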